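-- pv_equiv track=rewrite | github.com/chointer/CodingProblems | 프로그래머스/2/340212. ［PCCP 기출문제］ 2번 ／ 퍼즐 게임 챌린지/［PCCP 기출문제］ 2번 ／ 퍼즐 게임 챌린지.py | solution
-- ===== SOURCE A (Python) =====
-- def cal_time(level, diffs, times):
--     total_time = 0
--
--     time_prev = 0
--     for diff, time_cur in zip(diffs, times):
--         level_gap = diff - level
--         total_time += max(level_gap, 0) * (time_prev + time_cur) + time_cur
--         time_prev = time_cur
--
--     return total_time
--
-- def solution(diffs, times, limit):
--     st = 1
--     en = 100000
--
--     while st <= en: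
--         mid = (st + en) // 2
--         t = cal_time(mid, diffs, times)
--
--         if t > limit:
--             st = mid + 1
--
--         else:       # t <= limit:
--             en = mid - 1
--
--     return st
-- ===== SOURCE B (Python) =====
-- def solution(diffs, times, limit):
--     base = 0
--     prev = 0
--     pairs = []
--     for d, t in zip(diffs, times):
--         pairs.append((d, prev + t))
--         base += t
--         prev = t
--     pairs.sort(key=lambda p: p[0])      # ascending difficulty
--     n = len(pairs)
--     ds = []
--     prefc = [0]
--     prefdc = [0]
--     sc = 0
--     sdc = 0
--     for d, c in pairs:
--         ds.append(d)
--         sc += c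
--         sdc += d * c
--         prefc.append(sc)
--         prefdc.append(sdc)
--
--     def play(level):
--         # first index whose difficulty exceeds level, by binary search
--         lo, hi = 0, n
--         while lo < hi:
--             m = (lo + hi) // 2
--             if ds[m] <= level:
--                 lo = m + 1
--             else:
--                 hi = m
--         return base + (sdc - prefdc[lo]) - level * (sc - prefc[lo])
--
--     st, en = 1, 100000
--     while st <= en:
--         mid = (st + en) // 2
--         if play(mid) > limit:
--             st = mid + 1
--         else:
--             en = mid - 1
--     return st
-- ===== Notes on version B (the rewrite author's own statement) =====
-- stated objective: faster
-- what changed: The inner O(n) play-time re-summation at every probed level disappears: B sorts the items by difficulty once, precomputes prefix sums of the coefficients c_i = times[i-1]+times[i] and of d_i*c_i, and evaluates each probed level's total play time in O(log n) by binary-searching the sorted difficulties, since the total equals base + sum over active items of (d_i-level)*c_i.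
import Mathlib
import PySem

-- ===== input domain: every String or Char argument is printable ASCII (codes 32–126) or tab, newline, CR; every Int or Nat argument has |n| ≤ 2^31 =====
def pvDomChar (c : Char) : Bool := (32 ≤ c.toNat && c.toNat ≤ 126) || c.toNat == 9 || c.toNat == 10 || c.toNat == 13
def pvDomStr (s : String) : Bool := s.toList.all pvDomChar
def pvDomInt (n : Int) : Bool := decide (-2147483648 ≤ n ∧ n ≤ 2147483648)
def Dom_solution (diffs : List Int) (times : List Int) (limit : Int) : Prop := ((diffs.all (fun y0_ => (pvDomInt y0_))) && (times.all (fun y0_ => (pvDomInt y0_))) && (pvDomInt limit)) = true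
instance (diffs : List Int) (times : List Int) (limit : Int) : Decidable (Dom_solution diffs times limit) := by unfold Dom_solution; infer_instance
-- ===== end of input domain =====

-- B evaluates each probed level's play time from sorted difficulty prefix sums instead of re-scanning all items per probe (objective: faster); return values proved equal on all inputs.


-- ===== PORT A =====
-- loop of cal_time: state (total_time, time_prev) over zip(diffs, times)
def pvCalLoop (level : Int) (zs : List (Int × Int)) (total prev : Int) : Int :=
  match zs with
  | [] => total
  | (diff, timeCur) :: rest =>
      pvCalLoop level rest (total + max (diff - level) 0 * (prev + timeCur) + timeCur) timeCur

def cal_time (level : Int) (diffs times : List Int) : Int :=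
  pvCalLoop level (diffs.zip times) 0 0

-- the while-loop of solution, recursion on the interval width
def pvBsLoop (diffs times : List Int) (limit st en : Int) : Int :=
  if h : st ≤ en then
    if cal_time (PySem.Int.floordiv (st + en) 2) diffs times > limit then
      pvBsLoop diffs times limit (PySem.Int.floordiv (st + en) 2 + 1) en
    else
      pvBsLoop diffs times limit st (PySem.Int.floordiv (st + en) 2 - 1)
  else st
termination_by (en + 1 - st).toNat
decreasing_by
  · have := PySem.Int.floordiv_two_mid_bounds h; omega
  · have := PySem.Int.floordiv_two_mid_bounds h; omega

def solution (diffs : List Int) (times : List Int) (limit : Int) : Int :=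
  pvBsLoop diffs times limit 1 100000

-- ===== PORT B =====
-- first loop of Source B: accumulate (base, pairs) with prev
def pvBuildLoop (zs : List (Int × Int)) (base prev : Int) (pairs : List (Int × Int)) :
    Int × List (Int × Int) :=
  match zs with
  | [] => (base, pairs)
  | (d, t) :: rest => pvBuildLoop rest (base + t) t (pairs ++ [(d, prev + t)])

-- second loop of Source B: ds, running sums sc/sdc, and the prefix-sum lists
def pvPrefLoop (ps : List (Int × Int)) (ds : List Int) (sc sdc : Int) (pc pd : List Int) :
    List Int × Int × Int × List Int × List Int :=
  match ps with
  | [] => (ds, sc, sdc, pc, pd)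
  | (d, c) :: rest =>
      pvPrefLoop rest (ds ++ [d]) (sc + c) (sdc + d * c) (pc ++ [sc + c]) (pd ++ [sdc + d * c])

-- the while-loop of play: binary search for the first index whose difficulty exceeds level
def pvFindLoop (ds : List Int) (level lo hi : Int) : Int :=
  if h : lo < hi then
    if PySem.List.pyGetD ds (PySem.Int.floordiv (lo + hi) 2) 0 ≤ level then
      pvFindLoop ds level (PySem.Int.floordiv (lo + hi) 2 + 1) hi
    else
      pvFindLoop ds level lo (PySem.Int.floordiv (lo + hi) 2)
  else lo
termination_by (hi - lo).toNat
decreasing_by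
  · have h1 := PySem.Int.floordiv_two_mid_bounds (le_of_lt h)
    have h2 := PySem.Int.floordiv_mul_add_mod (lo + hi) 2
    have h3 := PySem.Int.mod_nonneg (lo + hi) (by norm_num : (0:Int) < 2)
    have h4 := PySem.Int.mod_lt (lo + hi) (by norm_num : (0:Int) < 2)
    omega
  · have h1 := PySem.Int.floordiv_two_mid_bounds (le_of_lt h)
    have h2 := PySem.Int.floordiv_mul_add_mod (lo + hi) 2
    have h3 := PySem.Int.mod_nonneg (lo + hi) (by norm_num : (0:Int) < 2)
    have h4 := PySem.Int.mod_lt (lo + hi) (by norm_num : (0:Int) < 2)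
    omega

-- play(level) of Source B
def pvPlay (base sc sdc : Int) (ds pc pd : List Int) (n level : Int) : Int :=
  base + (sdc - PySem.List.pyGetD pd (pvFindLoop ds level 0 n) 0)
    - level * (sc - PySem.List.pyGetD pc (pvFindLoop ds level 0 n) 0)

-- the outer while-loop of Source B
def pvBsLoopB (base sc sdc : Int) (ds pc pd : List Int) (n limit st en : Int) : Int :=
  if h : st ≤ en then
    if pvPlay base sc sdc ds pc pd n (PySem.Int.floordiv (st + en) 2) > limit then
      pvBsLoopB base sc sdc ds pc pd n limit (PySem.Int.floordiv (st + en) 2 + 1) en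
    else
      pvBsLoopB base sc sdc ds pc pd n limit st (PySem.Int.floordiv (st + en) 2 - 1)
  else st
termination_by (en + 1 - st).toNat
decreasing_by
  · have := PySem.Int.floordiv_two_mid_bounds h; omega
  · have := PySem.Int.floordiv_two_mid_bounds h; omega

def solution_alt (diffs : List Int) (times : List Int) (limit : Int) : Int :=
  let bp := pvBuildLoop (diffs.zip times) 0 0 []
  let s := PySem.List.sorted bp.2 (fun p => p.1) false
  let pr := pvPrefLoop s [] 0 0 [0] [0]
  pvBsLoopB bp.1 pr.2.1 pr.2.2.1 pr.1 pr.2.2.2.1 pr.2.2.2.2 (s.length : Int) limit 1 100000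

-- ===== PRECONDITION & SPEC =====
def Spec_solution (diffs : List Int) (times : List Int) (limit : Int) (out : Int) : Prop := out = solution_alt diffs times limit
instance (diffs : List Int) (times : List Int) (limit : Int) (out : Int) : Decidable (Spec_solution diffs times limit out) := by unfold Spec_solution; infer_instance

-- ===== CLAIM (what is proved, stated in full; the proofs are below) =====
def Claim_equal_solution : Prop := ∀ (diffs : List Int) (times : List Int) (limit : Int), Dom_solution diffs times limit → Spec_solution diffs times limit (solution diffs times limit)

-- ===== LEMMAS AND PROOFS =====

-- proof-side sums over a pair list
def pvSumSnd (zs : List (Int × Int)) : Int := (zs.map Prod.snd).sum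
def pvSc (ps : List (Int × Int)) : Int := (ps.map Prod.snd).sum
def pvSdc (ps : List (Int × Int)) : Int := (ps.map (fun p => p.1 * p.2)).sum
def pvG (L : Int) (ps : List (Int × Int)) : Int := (ps.map (fun p => max (p.1 - L) 0 * p.2)).sum
-- cons-form of the pair list Source B builds
def pvMkPairs (zs : List (Int × Int)) (prev : Int) : List (Int × Int) :=
  match zs with
  | [] => []
  | (d, t) :: rest => (d, prev + t) :: pvMkPairs rest t
-- cons-forms of the prefix-sum lists
def pvPrefC : List (Int × Int) → Int → List Int
  | [], _ => []
  | (_, c) :: rest, sc0 => (sc0 + c) :: pvPrefC rest (sc0 + c)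
def pvPrefD : List (Int × Int) → Int → List Int
  | [], _ => []
  | (d, c) :: rest, sdc0 => (sdc0 + d * c) :: pvPrefD rest (sdc0 + d * c)

theorem pvCalLoop_eq (level : Int) :
    ∀ (zs : List (Int × Int)) (total prev : Int),
      pvCalLoop level zs total prev = total + pvSumSnd zs + pvG level (pvMkPairs zs prev) := by
  intro zs
  induction zs with
  | nil => intro total prev; simp [pvCalLoop, pvSumSnd, pvG, pvMkPairs]
  | cons p rest ih =>
      intro total prev
      obtain ⟨d, t⟩ := p
      simp only [pvCalLoop, ih, pvSumSnd, pvG, pvMkPairs, List.map_cons, List.sum_cons]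
      ring

theorem pvBuild_eq :
    ∀ (zs : List (Int × Int)) (base prev : Int) (acc : List (Int × Int)),
      pvBuildLoop zs base prev acc = (base + pvSumSnd zs, acc ++ pvMkPairs zs prev) := by
  intro zs
  induction zs with
  | nil => intro base prev acc; simp [pvBuildLoop, pvSumSnd, pvMkPairs]
  | cons p rest ih =>
      intro base prev acc
      obtain ⟨d, t⟩ := p
      simp only [pvBuildLoop, ih, pvSumSnd, pvMkPairs, List.map_cons, List.sum_cons]
      simp [add_assoc]

theorem pvPref_eq :
    ∀ (ps : List (Int × Int)) (ds : List Int) (sc sdc : Int) (pc pd : List Int),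
      pvPrefLoop ps ds sc sdc pc pd =
        (ds ++ ps.map Prod.fst, sc + pvSc ps, sdc + pvSdc ps,
          pc ++ pvPrefC ps sc, pd ++ pvPrefD ps sdc) := by
  intro ps
  induction ps with
  | nil => intro ds sc sdc pc pd; simp [pvPrefLoop, pvSc, pvSdc, pvPrefC, pvPrefD]
  | cons p rest ih =>
      intro ds sc sdc pc pd
      obtain ⟨d, c⟩ := p
      simp only [pvPrefLoop, ih, pvSc, pvSdc, pvPrefC, pvPrefD, List.map_cons, List.sum_cons,
        Prod.mk.injEq]
      refine ⟨by simp, by ring, by ring, by simp [List.append_assoc], by simp [List.append_assoc]⟩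

theorem pvPrefC_length : ∀ (s : List (Int × Int)) (sc0 : Int), (pvPrefC s sc0).length = s.length := by
  intro s
  induction s with
  | nil => intro sc0; simp [pvPrefC]
  | cons p rest ih => obtain ⟨d, c⟩ := p; intro sc0; simp [pvPrefC, ih]

theorem pvPrefD_length : ∀ (s : List (Int × Int)) (sdc0 : Int), (pvPrefD s sdc0).length = s.length := by
  intro s
  induction s with
  | nil => intro sdc0; simp [pvPrefD]
  | cons p rest ih => obtain ⟨d, c⟩ := p; intro sdc0; simp [pvPrefD, ih]

theorem pvPrefC_getD :
    ∀ (s : List (Int × Int)) (sc0 : Int) (j : Nat), j ≤ s.length →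
      (sc0 :: pvPrefC s sc0).getD j 0 = sc0 + pvSc (s.take j) := by
  intro s
  induction s with
  | nil =>
      intro sc0 j hj
      have hj0 : j = 0 := by simpa using hj
      subst hj0
      simp [pvSc]
  | cons p rest ih =>
      intro sc0 j hj
      obtain ⟨d, c⟩ := p
      cases j with
      | zero => simp [pvSc]
      | succ j' =>
          simp only [pvPrefC, List.getD_cons_succ, List.take_succ_cons]
          rw [ih (sc0 + c) j' (by simpa using hj)]
          simp only [pvSc, List.map_cons, List.sum_cons]
          ring

theorem pvPrefD_getD :
    ∀ (s : List (Int × Int)) (sdc0 : Int) (j : Nat), j ≤ s.length →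
      (sdc0 :: pvPrefD s sdc0).getD j 0 = sdc0 + pvSdc (s.take j) := by
  intro s
  induction s with
  | nil =>
      intro sdc0 j hj
      have hj0 : j = 0 := by simpa using hj
      subst hj0
      simp [pvSdc]
  | cons p rest ih =>
      intro sdc0 j hj
      obtain ⟨d, c⟩ := p
      cases j with
      | zero => simp [pvSdc]
      | succ j' =>
          simp only [pvPrefD, List.getD_cons_succ, List.take_succ_cons]
          rw [ih (sdc0 + d * c) j' (by simpa using hj)]
          simp only [pvSdc, List.map_cons, List.sum_cons]
          ring

theorem pvSc_append (u v : List (Int × Int)) : pvSc (u ++ v) = pvSc u + pvSc v := by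
  simp [pvSc]

theorem pvSdc_append (u v : List (Int × Int)) : pvSdc (u ++ v) = pvSdc u + pvSdc v := by
  simp [pvSdc]

theorem pvG_append (L : Int) (u v : List (Int × Int)) : pvG L (u ++ v) = pvG L u + pvG L v := by
  simp [pvG]

theorem pvG_perm {L : Int} {ps qs : List (Int × Int)} (h : ps.Perm qs) : pvG L ps = pvG L qs :=
  (h.map _).sum_eq

theorem pvG_active {L : Int} : ∀ {ps : List (Int × Int)}, (∀ p ∈ ps, L < p.1) →
    pvG L ps = pvSdc ps - L * pvSc ps := by
  intro ps
  induction ps with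
  | nil => simp [pvG, pvSdc, pvSc]
  | cons p rest ih =>
      intro h
      simp only [pvG, pvSdc, pvSc, List.map_cons, List.sum_cons]
      have h1 : max (p.1 - L) 0 = p.1 - L := by
        have := h p (by simp); omega
      have h2 := ih (fun q hq => h q (by simp [hq]))
      simp only [pvG, pvSdc, pvSc] at h2
      rw [h1, h2]; ring

theorem pvG_inactive {L : Int} : ∀ {ps : List (Int × Int)}, (∀ p ∈ ps, p.1 ≤ L) →
    pvG L ps = 0 := by
  intro ps
  induction ps with
  | nil => simp [pvG]
  | cons p rest ih =>
      intro h
      simp only [pvG, List.map_cons, List.sum_cons]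
      have h1 : max (p.1 - L) 0 = 0 := by have := h p (by simp); omega
      have h2 := ih (fun q hq => h q (by simp [hq]))
      simp only [pvG] at h2
      rw [h1, h2]; ring

-- f L = base + G L pairs, in the exact terms both ports produce
theorem pvCal_eq (L : Int) (diffs times : List Int) :
    cal_time L diffs times =
      pvSumSnd (diffs.zip times) + pvG L (pvMkPairs (diffs.zip times) 0) := by
  simpa using pvCalLoop_eq L (diffs.zip times) 0 0

-- the inner binary search: boundary facts at the final split point
theorem pvFind_inv (ds : List Int) (level : Int) :
    ∀ lo hi : Int, 0 ≤ lo → lo ≤ hi → hi ≤ (ds.length : Int) →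
      (lo = 0 ∨ ds.getD (lo - 1).toNat 0 ≤ level) →
      (hi = (ds.length : Int) ∨ level < ds.getD hi.toNat 0) →
      0 ≤ pvFindLoop ds level lo hi ∧ pvFindLoop ds level lo hi ≤ (ds.length : Int) ∧
      (pvFindLoop ds level lo hi = 0 ∨
        ds.getD (pvFindLoop ds level lo hi - 1).toNat 0 ≤ level) ∧
      (pvFindLoop ds level lo hi = (ds.length : Int) ∨
        level < ds.getD (pvFindLoop ds level lo hi).toNat 0) := by
  intro lo hi
  induction lo, hi using pvFindLoop.induct ds level with
  | case1 lo hi h ht ih =>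
      intro h0 hlh hhn hleft hright
      rw [pvFindLoop]
      simp only [h, dite_true, ht, if_true]
      have hm := PySem.Int.floordiv_two_mid_bounds (le_of_lt h)
      have h2 := PySem.Int.floordiv_mul_add_mod (lo + hi) 2
      have h3 := PySem.Int.mod_nonneg (lo + hi) (by norm_num : (0:Int) < 2)
      have h4 := PySem.Int.mod_lt (lo + hi) (by norm_num : (0:Int) < 2)
      refine ih (by omega) (by omega) (by omega) ?_ hright
      right
      have he : (PySem.Int.floordiv (lo + hi) 2 + 1 - 1) = PySem.Int.floordiv (lo + hi) 2 := by ring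
      rw [he]
      have hrange : 0 ≤ PySem.Int.floordiv (lo + hi) 2 ∧
          PySem.Int.floordiv (lo + hi) 2 < (ds.length : Int) := by omega
      rw [PySem.List.pyGetD_eq_getElem ds 0 hrange.1 hrange.2] at ht
      rw [List.getD_eq_getElem ds 0 (by omega)]
      exact ht
  | case2 lo hi h ht ih =>
      intro h0 hlh hhn hleft hright
      rw [pvFindLoop]
      simp only [h, dite_true, ht, if_false]
      have hm := PySem.Int.floordiv_two_mid_bounds (le_of_lt h)
      have h2 := PySem.Int.floordiv_mul_add_mod (lo + hi) 2
      have h3 := PySem.Int.mod_nonneg (lo + hi) (by norm_num : (0:Int) < 2)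
      have h4 := PySem.Int.mod_lt (lo + hi) (by norm_num : (0:Int) < 2)
      refine ih h0 (by omega) (by omega) hleft ?_
      right
      have hrange : 0 ≤ PySem.Int.floordiv (lo + hi) 2 ∧
          PySem.Int.floordiv (lo + hi) 2 < (ds.length : Int) := by omega
      rw [PySem.List.pyGetD_eq_getElem ds 0 hrange.1 hrange.2] at ht
      rw [List.getD_eq_getElem ds 0 (by omega)]
      omega
  | case3 lo hi h =>
      intro h0 hlh hhn hleft hright
      rw [pvFindLoop]
      simp only [h, dite_false]
      have : lo = hi := by omega
      subst this
      exact ⟨h0, by omega, hleft, hright⟩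

-- globalize the boundary facts over a sorted list
theorem pvFind_split (ds : List Int) (level : Int) (hsort : ds.Pairwise (· ≤ ·)) :
    0 ≤ pvFindLoop ds level 0 (ds.length : Int) ∧
    pvFindLoop ds level 0 (ds.length : Int) ≤ (ds.length : Int) ∧
    (∀ i : Nat, (i : Int) < pvFindLoop ds level 0 (ds.length : Int) → i < ds.length →
      ds.getD i 0 ≤ level) ∧
    (∀ i : Nat, pvFindLoop ds level 0 (ds.length : Int) ≤ (i : Int) → i < ds.length →
      level < ds.getD i 0) := by
  obtain ⟨h0, hn, hleft, hright⟩ :=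
    pvFind_inv ds level 0 (ds.length : Int) le_rfl (by omega) le_rfl (Or.inl rfl) (Or.inl rfl)
  set j := pvFindLoop ds level 0 (ds.length : Int) with hj
  have hmono : ∀ (a b : Nat), a ≤ b → b < ds.length → ds.getD a 0 ≤ ds.getD b 0 := by
    intro a b hab hb
    rcases Nat.lt_or_ge a b with h | h
    · have := (List.pairwise_iff_getElem.mp hsort) a b (by omega) hb h
      rw [List.getD_eq_getElem ds 0 (by omega), List.getD_eq_getElem ds 0 hb]
      exact this
    · have : a = b := by omega
      subst this; rfl
  refine ⟨h0, hn, ?_, ?_⟩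
  · intro i hij hilen
    rcases hleft with h | h
    · omega
    · have hji : (j - 1).toNat < ds.length := by omega
      have : ds.getD i 0 ≤ ds.getD (j - 1).toNat 0 := hmono i (j - 1).toNat (by omega) hji
      omega
  · intro i hij hilen
    rcases hright with h | h
    · omega
    · have : ds.getD j.toNat 0 ≤ ds.getD i 0 := hmono j.toNat i (by omega) hilen
      omega

-- play(level) computes exactly cal_time(level)
theorem pvPlay_eq (diffs times : List Int) (level : Int) :
    pvPlay (pvSumSnd (diffs.zip times))
      (pvSc (PySem.List.sorted (pvMkPairs (diffs.zip times) 0) (fun p => p.1) false))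
      (pvSdc (PySem.List.sorted (pvMkPairs (diffs.zip times) 0) (fun p => p.1) false))
      ((PySem.List.sorted (pvMkPairs (diffs.zip times) 0) (fun p => p.1) false).map Prod.fst)
      (0 :: pvPrefC (PySem.List.sorted (pvMkPairs (diffs.zip times) 0) (fun p => p.1) false) 0)
      (0 :: pvPrefD (PySem.List.sorted (pvMkPairs (diffs.zip times) 0) (fun p => p.1) false) 0)
      ((PySem.List.sorted (pvMkPairs (diffs.zip times) 0) (fun p => p.1) false).length : Int)
      level = cal_time level diffs times := by
  set s := PySem.List.sorted (pvMkPairs (diffs.zip times) 0) (fun p => p.1) false with hs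
  set ds := s.map Prod.fst with hds
  have hlen : ds.length = s.length := by simp [hds]
  have hsort : ds.Pairwise (· ≤ ·) := by
    have := PySem.List.sorted_map_key_pairwise (pvMkPairs (diffs.zip times) 0) (fun p => p.1)
    simpa [hds, hs] using this
  have hperm : s.Perm (pvMkPairs (diffs.zip times) 0) :=
    PySem.List.sorted_perm (pvMkPairs (diffs.zip times) 0) (fun p => p.1) false
  obtain ⟨h0, hn, hleft, hright⟩ := pvFind_split ds level hsort
  unfold pvPlay
  rw [← hlen]
  set j := pvFindLoop ds level 0 (ds.length : Int) with hj
  have hjn : j.toNat ≤ s.length := by omega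
  -- the two indexed prefix sums
  have hpc : PySem.List.pyGetD (0 :: pvPrefC s 0) j 0 = pvSc (s.take j.toNat) := by
    rw [PySem.List.pyGetD_eq_getElem (0 :: pvPrefC s 0) 0 h0
      (by rw [List.length_cons, pvPrefC_length]; push_cast; omega)]
    rw [← List.getD_eq_getElem (0 :: pvPrefC s 0) 0
      (by rw [List.length_cons, pvPrefC_length]; omega)]
    rw [pvPrefC_getD s 0 j.toNat hjn]
    ring
  have hpd : PySem.List.pyGetD (0 :: pvPrefD s 0) j 0 = pvSdc (s.take j.toNat) := by
    rw [PySem.List.pyGetD_eq_getElem (0 :: pvPrefD s 0) 0 h0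
      (by rw [List.length_cons, pvPrefD_length]; push_cast; omega)]
    rw [← List.getD_eq_getElem (0 :: pvPrefD s 0) 0
      (by rw [List.length_cons, pvPrefD_length]; omega)]
    rw [pvPrefD_getD s 0 j.toNat hjn]
    ring
  rw [hpc, hpd]
  -- the split of s at j.toNat
  have htd : s.take j.toNat ++ s.drop j.toNat = s := List.take_append_drop _ _
  have htake : ∀ p ∈ s.take j.toNat, p.1 ≤ level := by
    intro p hp
    obtain ⟨i, hilen, hieq⟩ := List.mem_iff_getElem.mp hp
    have hi1 : i < j.toNat := by
      have := hilen; simp [List.length_take] at this; omega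
    have hi2 : i < s.length := by
      have := hilen; simp [List.length_take] at this; omega
    have : (s.take j.toNat)[i]'hilen = s[i]'hi2 := List.getElem_take
    rw [this] at hieq
    have hds_i : ds.getD i 0 = p.1 := by
      rw [List.getD_eq_getElem ds 0 (by omega)]
      simp [hds, hieq]
    have := hleft i (by omega) (by omega)
    omega
  have hdrop : ∀ p ∈ s.drop j.toNat, level < p.1 := by
    intro p hp
    obtain ⟨i, hilen, hieq⟩ := List.mem_iff_getElem.mp hp
    have hi2 : j.toNat + i < s.length := by
      have := hilen; simp [List.length_drop] at this; omega
    have : (s.drop j.toNat)[i]'hilen = s[j.toNat + i]'hi2 := List.getElem_drop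
    rw [this] at hieq
    have hds_i : ds.getD (j.toNat + i) 0 = p.1 := by
      rw [List.getD_eq_getElem ds 0 (by omega)]
      simp [hds, hieq]
    have := hright (j.toNat + i) (by omega) (by omega)
    omega
  -- assemble
  rw [pvCal_eq level diffs times]
  have hGsplit : pvG level (pvMkPairs (diffs.zip times) 0) =
      pvG level (s.take j.toNat) + pvG level (s.drop j.toNat) := by
    rw [← pvG_perm hperm, ← pvG_append, htd]
  have hScSplit : pvSc s = pvSc (s.take j.toNat) + pvSc (s.drop j.toNat) := by
    rw [← pvSc_append, htd]
  have hSdcSplit : pvSdc s = pvSdc (s.take j.toNat) + pvSdc (s.drop j.toNat) := by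
    rw [← pvSdc_append, htd]
  rw [hGsplit, pvG_inactive htake, pvG_active hdrop, hScSplit, hSdcSplit]
  ring

-- the two search loops coincide once the probes coincide
theorem pvBsB_eq (base sc sdc : Int) (ds pc pd : List Int) (n : Int)
    (diffs times : List Int) (limit : Int)
    (hplay : ∀ L, pvPlay base sc sdc ds pc pd n L = cal_time L diffs times) :
    ∀ st en, pvBsLoopB base sc sdc ds pc pd n limit st en = pvBsLoop diffs times limit st en := by
  intro st en
  induction st, en using pvBsLoopB.induct base sc sdc ds pc pd n limit with
  | case1 st en h ht ih =>
      rw [pvBsLoopB, pvBsLoop]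
      have htA : cal_time (PySem.Int.floordiv (st + en) 2) diffs times > limit := by
        rw [← hplay]; exact ht
      simp only [h, dite_true, if_pos ht, if_pos htA]
      exact ih
  | case2 st en h ht ih =>
      rw [pvBsLoopB, pvBsLoop]
      have htA : ¬ cal_time (PySem.Int.floordiv (st + en) 2) diffs times > limit := by
        rw [← hplay]; exact ht
      simp only [h, dite_true, if_neg ht, if_neg htA]
      exact ih
  | case3 st en h =>
      rw [pvBsLoopB, pvBsLoop, dif_neg h, dif_neg h]

-- ===== VERDICT (by name: the statement is the Claim_ definition above) =====
theorem solution_spec : Claim_equal_solution := by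
  intro diffs times limit _
  unfold Spec_solution solution
  simp only [solution_alt]
  rw [pvBuild_eq]
  simp only [zero_add, List.nil_append]
  rw [pvPref_eq]
  simp only [List.nil_append, zero_add, List.singleton_append]
  exact (pvBsB_eq _ _ _ _ _ _ _ diffs times limit
    (fun L => pvPlay_eq diffs times L) 1 100000).symm
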